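-- pv_equiv track=rewrite | github.com/Hawkeyes1/portfolio | bootstrap-percolation/perc.py | advance
-- ===== SOURCE A (Python) =====
-- import copy
--
-- def neighbors(previous,x,y):
-- 	total=0
-- 	n = len(previous)
-- 	# previous[x][y]==0, so we can simplify by including previous[x][y]
-- 	# as a possible neighbor instead of excluding.
-- 	total += sum( [previous[x][a] for a in range(n)] )
-- 	total += sum( [previous[a][y] for a in range(n)] )
-- 	return total
--
-- def advance(grid,threshold=2):
-- 	previous = copy.copy(grid)
-- 	n = len(grid)
-- 	altered = False
-- 	for x in range(n):
-- 		for y in range(n):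
-- 			if previous[x][y] == 1: continue
-- 			elif neighbors(previous,x,y) >= threshold:
-- 				grid[x][y] = 1
-- 				altered = True
-- 	return altered
-- ===== SOURCE B (Python) =====
-- def advance(grid, threshold=2):
--     # Incremental row/column sums (O(n^2) vs A's O(n^3)); performs the same
--     # in-place mutation of grid as A; equivalence claim is about the return value.
--     n = len(grid)
--     row = [sum(grid[x][y] for y in range(n)) for x in range(n)]
--     col = [sum(grid[x][y] for x in range(n)) for y in range(n)]
--     altered = False
--     for x in range(n):
--         for y in range(n):
--             v = grid[x][y]
--             if v == 1:
--                 continue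
--             if row[x] + col[y] >= threshold:
--                 grid[x][y] = 1
--                 row[x] += 1 - v
--                 col[y] += 1 - v
--                 altered = True
--     return altered
-- ===== Notes on version B (the rewrite author's own statement) =====
-- stated objective: faster
-- what changed: Replaces the per-cell recomputation of full row+column sums (neighbors) by row/column sum arrays computed once and updated incrementally as cells are set to 1 in the same iteration order, mirroring A's shared-row mutation semantics.
import Mathlib
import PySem

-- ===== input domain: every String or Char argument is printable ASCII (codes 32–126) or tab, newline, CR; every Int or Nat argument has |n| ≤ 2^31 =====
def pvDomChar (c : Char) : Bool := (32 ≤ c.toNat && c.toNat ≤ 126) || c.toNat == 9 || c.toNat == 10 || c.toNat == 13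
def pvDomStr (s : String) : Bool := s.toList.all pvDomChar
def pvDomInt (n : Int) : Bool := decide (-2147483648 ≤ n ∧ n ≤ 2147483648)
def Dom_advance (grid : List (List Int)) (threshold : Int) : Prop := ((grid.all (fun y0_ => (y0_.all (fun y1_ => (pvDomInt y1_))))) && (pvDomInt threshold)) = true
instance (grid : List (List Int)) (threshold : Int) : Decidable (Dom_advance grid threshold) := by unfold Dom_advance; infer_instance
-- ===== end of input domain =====

-- B replaces A's per-cell full row+column rescans by row/column sum arrays updated
-- incrementally in the same iteration order (O(n^2) vs O(n^3)); both A and B mutate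
-- grid in place in Python identically — the equivalence proved is about the return value.

-- ===== PORT A =====
-- previous = copy.copy(grid) shares the row objects with grid, so every write
-- grid[x][y] = 1 is visible through previous; in this pure port 'previous' is
-- therefore always the current grid state carried through the folds.
-- cell accesses use getD; Pre_advance guarantees every index used is in range,
-- so getD agrees with Python indexing on all admitted inputs.
def pvCell (g : List (List Int)) (x y : Nat) : Int := (g.getD x []).getD y 0

def neighbors (previous : List (List Int)) (x y : Nat) : Int :=
  let n := previous.length
  ((List.range n).map (fun a => pvCell previous x a)).sum
  + ((List.range n).map (fun a => pvCell previous a y)).sum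

def pvSet2 (g : List (List Int)) (x y : Nat) (v : Int) : List (List Int) :=
  g.set x ((g.getD x []).set y v)

def advance (grid : List (List Int)) (threshold : Int) : Bool :=
  let n := grid.length
  let res := (List.range n).foldl (fun (st : List (List Int) × Bool) x =>
      (List.range n).foldl (fun st y =>
        if pvCell st.1 x y = 1 then st
        else if neighbors st.1 x y ≥ threshold then (pvSet2 st.1 x y 1, true)
        else st) st) (grid, false)
  res.2

-- ===== PORT B =====
def advance_alt (grid : List (List Int)) (threshold : Int) : Bool :=
  let n := grid.length
  let row := (List.range n).map (fun x => ((List.range n).map (fun y => pvCell grid x y)).sum)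
  let col := (List.range n).map (fun y => ((List.range n).map (fun x => pvCell grid x y)).sum)
  let res := (List.range n).foldl
    (fun (st : List (List Int) × List Int × List Int × Bool) x =>
      (List.range n).foldl (fun st y =>
        let v := pvCell st.1 x y
        if v = 1 then st
        else if st.2.1.getD x 0 + st.2.2.1.getD y 0 ≥ threshold then
          (pvSet2 st.1 x y 1,
           st.2.1.set x (st.2.1.getD x 0 + (1 - v)),
           st.2.2.1.set y (st.2.2.1.getD y 0 + (1 - v)),
           true)
        else st) st) (grid, row, col, false)
  res.2.2.2

-- ===== PRECONDITION & SPEC =====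
-- Pre_advance: every row has at least len(grid) entries — exactly the inputs on
-- which Python A returns (on any shorter row A raises IndexError; B raises too).
def Pre_advance (grid : List (List Int)) (threshold : Int) : Prop :=
  ∀ r ∈ grid, grid.length ≤ r.length
instance (grid : List (List Int)) (threshold : Int) : Decidable (Pre_advance grid threshold) := by unfold Pre_advance; infer_instance
def pvWitness_advance : List (List Int) × Int := ([[0, 1], [1, 0]], 2)
def Spec_advance (grid : List (List Int)) (threshold : Int) (out : Bool) : Prop := out = advance_alt grid threshold
instance (grid : List (List Int)) (threshold : Int) (out : Bool) : Decidable (Spec_advance grid threshold out) := by unfold Spec_advance; infer_instance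

-- ===== CLAIM (what is proved, stated in full; the proofs are below) =====
def Claim_equal_advance : Prop := ∀ (grid : List (List Int)) (threshold : Int), Dom_advance grid threshold → Pre_advance grid threshold → Spec_advance grid threshold (advance grid threshold)

-- ===== LEMMAS AND PROOFS =====

def rowSum (n : Nat) (g : List (List Int)) (x : Nat) : Int :=
  ((List.range n).map (fun j => pvCell g x j)).sum
def colSum (n : Nat) (g : List (List Int)) (y : Nat) : Int :=
  ((List.range n).map (fun i => pvCell g i y)).sum

/-- Simulation relation between A's state and B's state. -/
def SimRel (n : Nat) (a : List (List Int) × Bool)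
    (b : List (List Int) × List Int × List Int × Bool) : Prop :=
  b.1 = a.1 ∧ b.2.2.2 = a.2 ∧ a.1.length = n ∧ (∀ r ∈ a.1, n ≤ r.length) ∧
  b.2.1 = (List.range n).map (rowSum n a.1) ∧
  b.2.2.1 = (List.range n).map (colSum n a.1)

lemma getD_map_range {α : Type} (f : Nat → α) (d : α) {x n : Nat} (hx : x < n) :
    (((List.range n).map f).getD x d) = f x := by
  rw [List.getD_eq_getElem?_getD]
  simp [hx]

lemma set_map_range {α : Type} [Inhabited α] (f : Nat → α) (r : α) {x n : Nat} (hx : x < n) :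
    ((List.range n).map f).set x r
      = (List.range n).map (fun i => if i = x then r else f i) := by
  apply List.ext_getElem
  · simp
  · intro i h1 h2
    simp at h2
    rw [List.getElem_set, List.getElem_map, List.getElem_range]
    rcases eq_or_ne i x with h | h
    · simp [h]
    · simp [h, if_neg (Ne.symm h)]

lemma pvCell_set2 (g : List (List Int)) (x y : Nat) (v : Int)
    (hx : x < g.length) (hy : y < (g.getD x []).length) (i j : Nat) :
    pvCell (pvSet2 g x y v) i j = if i = x ∧ j = y then v else pvCell g i j := by
  unfold pvCell pvSet2
  rw [List.getD_eq_getElem?_getD, List.getD_eq_getElem?_getD,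
      List.getD_eq_getElem?_getD, List.getD_eq_getElem?_getD]
  by_cases hix : i = x
  · subst hix
    rw [List.getElem?_set_self (by simpa using hx)]
    simp only [Option.getD_some]
    by_cases hjy : j = y
    · subst hjy
      rw [List.getElem?_set_self (by simpa [List.getD_eq_getElem?_getD] using hy)]
      simp
    · rw [List.getElem?_set_ne (fun h => hjy h.symm)]
      simp [hjy, List.getD_eq_getElem?_getD]
  · rw [List.getElem?_set_ne (fun h => hix h.symm)]
    simp [hix]

lemma sum_range_update (n y : Nat) (f f' : Nat → Int) (hy : y < n)
    (h : ∀ j, j ≠ y → f' j = f j) :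
    ((List.range n).map f').sum = ((List.range n).map f).sum - f y + f' y := by
  induction n with
  | zero => omega
  | succ m ih =>
    rw [List.range_succ]
    by_cases hym : y = m
    · subst hym
      have : ∀ j ∈ List.range y, f' j = f j := by
        intro j hj; exact h j (by simp at hj; omega)
      rw [List.map_append, List.map_append, List.sum_append, List.sum_append,
          List.map_congr_left this]
      simp only [List.map_cons, List.map_nil, List.sum_cons, List.sum_nil, add_zero]
      ring
    · have hy' : y < m := by omega
      rw [List.map_append, List.map_append, List.sum_append, List.sum_append,
          ih hy']
      simp only [List.map_cons, List.map_nil, List.sum_cons, List.sum_nil, add_zero]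
      rw [h m (by omega)]
      ring

lemma step_rel {n : Nat} {threshold : Int} {x y : Nat} (hx : x < n) (hy : y < n)
    {a : List (List Int) × Bool} {b : List (List Int) × List Int × List Int × Bool}
    (hR : SimRel n a b) :
    SimRel n
      (if pvCell a.1 x y = 1 then a
       else if neighbors a.1 x y ≥ threshold then (pvSet2 a.1 x y 1, true) else a)
      (let v := pvCell b.1 x y
       if v = 1 then b
       else if b.2.1.getD x 0 + b.2.2.1.getD y 0 ≥ threshold then
         (pvSet2 b.1 x y 1,
          b.2.1.set x (b.2.1.getD x 0 + (1 - v)),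
          b.2.2.1.set y (b.2.2.1.getD y 0 + (1 - v)),
          true)
       else b
       ) := by
  obtain ⟨hg, halt, hlen, hrows, hrow, hcol⟩ := hR
  have hxg : x < a.1.length := by omega
  have hrowx : (a.1.getD x []) ∈ a.1 := by
    rw [List.getD_eq_getElem _ _ hxg]; exact List.getElem_mem hxg
  have hyg : y < (a.1.getD x []).length := lt_of_lt_of_le (by omega) (hrows _ hrowx)
  have hv : pvCell b.1 x y = pvCell a.1 x y := by rw [hg]
  by_cases hv1 : pvCell a.1 x y = 1
  · simp only [hv, hv1, if_true]
    exact ⟨hg, halt, hlen, hrows, hrow, hcol⟩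
  · have hbr : b.2.1.getD x 0 = rowSum n a.1 x := by rw [hrow, getD_map_range _ _ hx]
    have hbc : b.2.2.1.getD y 0 = colSum n a.1 y := by rw [hcol, getD_map_range _ _ hy]
    have hcond : b.2.1.getD x 0 + b.2.2.1.getD y 0 = neighbors a.1 x y := by
      rw [hbr, hbc]; unfold neighbors rowSum colSum; rw [hlen]
    simp only [hv, if_neg hv1, hcond]
    by_cases hth : neighbors a.1 x y ≥ threshold
    · rw [if_pos hth, if_pos hth]
      have hcell : ∀ i j, pvCell (pvSet2 a.1 x y 1) i j
          = if i = x ∧ j = y then 1 else pvCell a.1 i j :=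
        pvCell_set2 a.1 x y 1 hxg hyg
      refine ⟨by rw [hg], rfl, ?_, ?_, ?_, ?_⟩
      · unfold pvSet2; simp [hlen]
      · intro r hr
        rcases List.mem_or_eq_of_mem_set hr with h | h
        · exact hrows r h
        · subst h; simpa using hrows _ hrowx
      · dsimp only
        rw [hrow, getD_map_range _ _ hx, set_map_range _ _ hx]
        apply List.map_congr_left
        intro i _
        by_cases hix : i = x
        · subst hix
          simp only [if_pos rfl]
          unfold rowSum
          rw [sum_range_update n y (fun j => pvCell a.1 i j) (fun j => pvCell (pvSet2 a.1 i y 1) i j) hy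
              (fun j hj => by simp [hcell, hj])]
          rw [hcell i y]
          simp only [and_self, if_true]
          ring
        · simp only [if_neg hix]
          unfold rowSum
          congr 1
          apply List.map_congr_left
          intro j _
          rw [hcell]
          simp [hix]
      · dsimp only
        rw [hcol, getD_map_range _ _ hy, set_map_range _ _ hy]
        apply List.map_congr_left
        intro j _
        by_cases hjy : j = y
        · subst hjy
          simp only [if_pos rfl]
          unfold colSum
          rw [sum_range_update n x (fun i => pvCell a.1 i j) (fun i => pvCell (pvSet2 a.1 x j 1) i j) hx
              (fun i hi => by simp [hcell, hi])]
          rw [hcell x j]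
          simp only [and_self, if_true]
          ring
        · simp only [if_neg hjy]
          unfold colSum
          congr 1
          apply List.map_congr_left
          intro i _
          rw [hcell]
          simp [hjy]
    · simp only [if_neg hth]
      exact ⟨hg, halt, hlen, hrows, hrow, hcol⟩

lemma foldl_rel {α β γ : Type} (R : α → β → Prop) (fa : α → γ → α) (fb : β → γ → β)
    (l : List γ) (h : ∀ a b x, x ∈ l → R a b → R (fa a x) (fb b x))
    {a : α} {b : β} (hab : R a b) : R (l.foldl fa a) (l.foldl fb b) := by
  induction l generalizing a b with
  | nil => exact hab
  | cons c cs ih =>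
    exact ih (fun a b x hx => h a b x (List.mem_cons_of_mem _ hx))
      (h a b c (List.mem_cons_self) hab)

-- ===== VERDICT (by name: the statement is the Claim_ definition above) =====
theorem advance_spec : Claim_equal_advance := by
  intro grid threshold _ hPre
  unfold Spec_advance advance advance_alt
  set n := grid.length with hn
  have hinit : SimRel n (grid, false)
      (grid,
       (List.range n).map (fun x => ((List.range n).map (fun y => pvCell grid x y)).sum),
       (List.range n).map (fun y => ((List.range n).map (fun x => pvCell grid x y)).sum),
       false) := ⟨rfl, rfl, rfl, hPre, rfl, rfl⟩
  have := foldl_rel (SimRel n)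
    (fun (st : List (List Int) × Bool) x =>
      (List.range n).foldl (fun st y =>
        if pvCell st.1 x y = 1 then st
        else if neighbors st.1 x y ≥ threshold then (pvSet2 st.1 x y 1, true)
        else st) st)
    (fun (st : List (List Int) × List Int × List Int × Bool) x =>
      (List.range n).foldl (fun st y =>
        let v := pvCell st.1 x y
        if v = 1 then st
        else if st.2.1.getD x 0 + st.2.2.1.getD y 0 ≥ threshold then
          (pvSet2 st.1 x y 1,
           st.2.1.set x (st.2.1.getD x 0 + (1 - v)),
           st.2.2.1.set y (st.2.2.1.getD y 0 + (1 - v)),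
           true)
        else st) st)
    (List.range n)
    (fun a b x hx hab => by
      have hx' : x < n := List.mem_range.mp hx
      exact foldl_rel (SimRel n) _ _ (List.range n)
        (fun a b y hy hab => step_rel hx' (List.mem_range.mp hy) hab) hab)
    hinit
  exact (this.2.1).symm
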